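-- pv_equiv track=rewrite | github.com/S0NGMinHyuk/programmers-file | n^2 배열 자르기.py | solution
-- ===== SOURCE A (Python) =====
-- def solution(n, left, right):                   # 극한의 메모리 관리 문제
--     answer = []
--     for i in range(1, n+1):
--         if left > n:                            # left가 n보다 클 경우 만들 필요가 없는 값이므로
--             left -= n ; right -= n              # left와 right 값을 n만큼 줄이고 스킵
--             continue
--
--         temp = [i]*i                            # 배열 초반 같은 값이 연속되는 부분은
--         answer += temp                          # for문 없이 따로 생성 후 추가
--         answer += [c for c in range(i+1, n+1)]  # 뒷부분 연속값만 for문으로 생성 후 추가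
--
--         if len(answer) >= right+1:              # answer 값이 right+1보다 많으면
--             break                               # 이후 값은 필요 없는 값이므로 반복문 탈출
--
--     return answer[left:right+1]                 # answer 값 중 필요한 값만 리턴
-- ===== SOURCE B (Python) =====
-- def solution(n, left, right):
--     return [max(i // n, i % n) + 1 for i in range(left, min(right + 1, n * n))]
-- ===== Notes on version B (the rewrite author's own statement) =====
-- stated objective: simpler
-- what changed: Instead of materialising the flattened n x n value array row by row and slicing it, B computes each requested element directly by the closed form max(i//n, i%n)+1 for i in [left, min(right, n*n-1)] in a one-line comprehension.
-- intended difference: On reversed windows (right < left) whose slice end right+1-n*skips is negative, A's answer[left:right+1] wraps around and returns a nonempty tail piece of the one row it built, while B returns [], the intended value of an empty query window. — e.g. on solution(5, 22, 18): A returns [5, 5], B returns []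
-- outside the precondition, e.g. on solution(-2, 0, 3): A returns [], B returns [1, 0, 1, 0]; on solution(3, -2, 5): A returns [2, 3], B returns [2, 3, 1, 2, 3, 2, 2, 3]
import Mathlib
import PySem

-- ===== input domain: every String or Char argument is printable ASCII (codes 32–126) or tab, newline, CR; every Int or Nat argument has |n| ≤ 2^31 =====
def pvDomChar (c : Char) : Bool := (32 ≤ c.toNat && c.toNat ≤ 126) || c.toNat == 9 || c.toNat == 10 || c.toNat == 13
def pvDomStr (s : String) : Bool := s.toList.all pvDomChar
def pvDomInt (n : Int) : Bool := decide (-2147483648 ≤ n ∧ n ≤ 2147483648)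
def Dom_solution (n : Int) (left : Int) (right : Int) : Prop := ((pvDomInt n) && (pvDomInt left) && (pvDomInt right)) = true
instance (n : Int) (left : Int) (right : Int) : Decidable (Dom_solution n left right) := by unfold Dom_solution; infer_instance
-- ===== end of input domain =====

-- B replaces A's row-by-row construction of the flattened array with the closed form
-- max(i//n, i%n)+1 per requested index (objective: simpler, a one-line closed form).

-- ===== PORT A =====
-- the for-loop over range(1, n+1) with early break, carrying (answer, left, right)
def solutionLoop (n : Int) : List Int → List Int → Int → Int → List Int × Int × Int
  | [], ans, l, r => (ans, l, r)
  | i :: rest, ans, l, r =>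
    if l > n then
      solutionLoop n rest ans (l - n) (r - n)
    else
      let temp := List.replicate i.toNat i                    -- [i]*i
      let ans2 := (ans ++ temp) ++ PySem.List.pyRange (i + 1) (n + 1) 1
      if ((ans2.length : Int) ≥ r + 1) then (ans2, l, r)
      else solutionLoop n rest ans2 l r

def solution (n : Int) (left : Int) (right : Int) : List Int :=
  let res := solutionLoop n (PySem.List.pyRange 1 (n + 1) 1) [] left right
  PySem.List.slice res.1 (some res.2.1) (some (res.2.2 + 1))

-- ===== PORT B =====
def solution_alt (n : Int) (left : Int) (right : Int) : List Int :=
  (PySem.List.pyRange left (min (right + 1) (n * n)) 1).map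
    (fun i => max (PySem.Int.floordiv i n) (PySem.Int.mod i n) + 1)

-- ===== PRECONDITION & SPEC =====
-- Pre_ is the function's natural domain: 0 ≤ n and 0 ≤ left. Outside it A still returns a
-- value ([] for n < 0, and for left < 0 a wrapped slice of however much of the array it
-- happened to build), accidents of A's materialise-then-slice mechanism that B's closed
-- form does not share.
def Pre_solution (n : Int) (left : Int) (right : Int) : Prop :=
  0 ≤ n ∧ 0 ≤ left
instance (n : Int) (left : Int) (right : Int) : Decidable (Pre_solution n left right) := by
  unfold Pre_solution; infer_instance
def pvWitness_solution : Int × Int × Int := (3, 2, 5)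

-- On reversed windows (right < left) whose slice end right+1-n*skips is negative, A's
-- answer[left:right+1] wraps around and returns a nonempty tail piece of the one row it
-- built, while B returns [], the intended value of an empty query window.
def D_solution (n : Int) (left : Int) (right : Int) : Prop :=
  1 ≤ n ∧ 0 ≤ left ∧ left ≤ n * n ∧ right < left ∧ left - right ≤ n ∧
    right ≤ (min n (max 0 (PySem.Int.floordiv (left - 1) n))) * n - 2
instance (n : Int) (left : Int) (right : Int) : Decidable (D_solution n left right) := by
  unfold D_solution; infer_instance

def Spec_solution (n : Int) (left : Int) (right : Int) (out : List Int) : Prop := ¬ D_solution n left right → out = solution_alt n left right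
instance (n : Int) (left : Int) (right : Int) (out : List Int) : Decidable (Spec_solution n left right out) := by unfold Spec_solution; infer_instance

def pvDiffWitness_solution : Int × Int × Int := (5, 22, 18)
def pvDiffWitnessOut_solution : (List Int) × (List Int) := ([5, 5], [])

-- ===== CLAIM (what is proved, stated in full; the proofs are below) =====
def Claim_unchanged_solution : Prop := ∀ (n : Int) (left : Int) (right : Int), Dom_solution n left right → Pre_solution n left right → Spec_solution n left right (solution n left right)
def Claim_changed_solution : Prop := Dom_solution (pvDiffWitness_solution.1) (pvDiffWitness_solution.2.1) (pvDiffWitness_solution.2.2) ∧ Pre_solution (pvDiffWitness_solution.1) (pvDiffWitness_solution.2.1) (pvDiffWitness_solution.2.2) ∧ D_solution (pvDiffWitness_solution.1) (pvDiffWitness_solution.2.1) (pvDiffWitness_solution.2.2) ∧ solution (pvDiffWitness_solution.1) (pvDiffWitness_solution.2.1) (pvDiffWitness_solution.2.2) = pvDiffWitnessOut_solution.1 ∧ solution_alt (pvDiffWitness_solution.1) (pvDiffWitness_solution.2.1) (pvDiffWitness_solution.2.2) = pvDiffWitnessOut_solution.2 ∧ pvDiffWitnessOut_solution.1 ≠ 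pvDiffWitnessOut_solution.2
def Claim_exact_solution : Prop := ∀ (n : Int) (left : Int) (right : Int), Dom_solution n left right → Pre_solution n left right → D_solution n left right → solution n left right ≠ solution_alt n left right

-- ===== LEMMAS AND PROOFS =====

-- B's per-index value, as a named function for the proofs
def gVal (n i : Int) : Int := max (PySem.Int.floordiv i n) (PySem.Int.mod i n) + 1

theorem gVal_eq (n i j : Int) (hn : 1 ≤ n) (hj0 : 0 ≤ j) (hjn : j < n) :
    gVal n ((i - 1) * n + j) = max (i - 1) j + 1 := by
  unfold gVal
  rw [PySem.Int.floordiv_eq_ediv_of_pos (by omega), PySem.Int.mod_eq_emod_of_pos (by omega)]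
  rw [show (i - 1) * n + j = j + (i - 1) * n by ring]
  rw [Int.add_mul_ediv_right _ _ (by omega : n ≠ 0), Int.add_mul_emod_self_right]
  rw [Int.ediv_eq_zero_of_lt hj0 hjn, Int.emod_eq_of_lt hj0 hjn]
  omega

-- A's row i equals B's values on the global index block [(i-1)*n, i*n)
theorem row_eq (n i : Int) (hn : 1 ≤ n) (h1 : 1 ≤ i) (h2 : i ≤ n) :
    List.replicate i.toNat i ++ PySem.List.pyRange (i + 1) (n + 1) 1
      = (PySem.List.pyRange ((i - 1) * n) (i * n) 1).map (gVal n) := by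
  apply List.ext_getElem
  · simp [PySem.List.length_pyRange_one]
    have : i * n - (i - 1) * n = n := by ring
    omega
  · intro k h1k h2k
    have hk : (k : Int) < n := by
      simp [PySem.List.length_pyRange_one] at h2k
      have : i * n - (i - 1) * n = n := by ring
      omega
    rw [List.getElem_map, PySem.List.getElem_pyRange_one]
    rw [gVal_eq n i k hn (by omega) hk]
    by_cases hki : k < i.toNat
    · rw [List.getElem_append_left (by simpa using hki)]
      rw [List.getElem_replicate]
      have : max (i - 1) (k : Int) = i - 1 := by omega
      omega
    · rw [List.getElem_append_right (by simpa using hki)]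
      rw [PySem.List.getElem_pyRange_one]
      simp only [List.length_replicate]
      have : max (i - 1) (k : Int) = k := by omega
      omega

-- A's result is the slice of the loop's final state
theorem solution_eq_slice (n L R : Int) (ansv : List Int) (lv rv : Int)
    (h : solutionLoop n (PySem.List.pyRange 1 (n + 1) 1) [] L R = (ansv, lv, rv)) :
    solution n L R = PySem.List.slice ansv (some lv) (some (rv + 1)) := by
  unfold solution
  rw [h]

-- invariant of A's loop for left ≤ right: at row i, with d the number of cells skipped so
-- far, the accumulator holds B's values for the global indices [d, (i-1)*n); the loop ends
-- with the values of [d', M) for some d' ≤ left, M ≤ n*n, and M ≥ right+1 unless M = n*n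
theorem loopInv (k : Nat) : ∀ (n L R d i : Int), 1 ≤ n → 0 ≤ L → L ≤ R →
    1 ≤ i → d ≤ (i - 1) * n → d ≤ L → (n + 1) - i = (k : Int) →
    (L - d > n → d = (i - 1) * n) →
    ∃ d' M, solutionLoop n (PySem.List.pyRange i (n + 1) 1)
        ((PySem.List.pyRange d ((i - 1) * n) 1).map (gVal n)) (L - d) (R - d)
      = ((PySem.List.pyRange d' M 1).map (gVal n), L - d', R - d')
      ∧ d' ≤ L ∧ M ≤ n * n ∧ (R + 1 ≤ M ∨ M = n * n) := by
  induction k with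
  | zero =>
    intro n L R d i hn hL0 hLR hi1 hdi hdL hk h9
    have hi : i = n + 1 := by omega
    subst hi
    rw [PySem.List.pyRange_one_eq_nil (le_refl _)]
    exact ⟨d, (n + 1 - 1) * n, rfl, hdL, le_of_eq (by ring), Or.inr (by ring)⟩
  | succ k ih =>
    intro n L R d i hn hL0 hLR hi1 hdi hdL hk h9
    have hilt : i < n + 1 := by omega
    have e1 : (i + 1 - 1) * n = i * n := by ring
    have e2 : i * n - (i - 1) * n = n := by ring
    rw [PySem.List.pyRange_one_cons hilt]
    simp only [solutionLoop]
    by_cases hskip : L - d > n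
    · rw [if_pos hskip]
      have hd : d = (i - 1) * n := h9 hskip
      have hrw : (PySem.List.pyRange d ((i - 1) * n) 1).map (gVal n)
          = (PySem.List.pyRange (d + n) ((i + 1 - 1) * n) 1).map (gVal n) := by
        rw [PySem.List.pyRange_one_eq_nil (by omega),
            PySem.List.pyRange_one_eq_nil (by omega : (i + 1 - 1) * n ≤ d + n)]
      rw [hrw, show L - d - n = L - (d + n) by ring, show R - d - n = R - (d + n) by ring]
      exact ih n L R (d + n) (i + 1) hn hL0 hLR (by omega) (by omega) (by omega)
        (by omega) (fun _ => by omega)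
    · rw [if_neg hskip]
      rw [List.append_assoc, row_eq n i hn hi1 (by omega),
          ← List.map_append, ← PySem.List.pyRange_one_append d ((i - 1) * n) (i * n) hdi (by omega)]
      by_cases hbrk : R + 1 ≤ i * n
      · rw [if_pos (by simp [PySem.List.length_pyRange_one]; omega)]
        exact ⟨d, i * n, rfl, hdL, by nlinarith, Or.inl hbrk⟩
      · rw [if_neg (by simp [PySem.List.length_pyRange_one]; omega)]
        have hrw : (PySem.List.pyRange d (i * n) 1).map (gVal n)
            = (PySem.List.pyRange d ((i + 1 - 1) * n) 1).map (gVal n) := by rw [e1]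
        rw [hrw]
        exact ih n L R d (i + 1) hn hL0 hLR (by omega) (by omega) hdL (by omega)
          (fun h => absurd h hskip)

theorem slice_map_pyRange (f : Int → Int) (a b x y : Int)
    (hax : a ≤ x) (hay : a ≤ y) :
    PySem.List.slice ((PySem.List.pyRange a b 1).map f) (some (x - a)) (some (y - a))
      = (PySem.List.pyRange x (min y b) 1).map f := by
  rw [PySem.List.slice_toNat _ (by omega) (by omega)]
  rcases le_or_gt b x with hbx | hxb
  · rw [List.drop_eq_nil_of_le (by simp [PySem.List.length_pyRange_one]; omega),
        List.take_nil, PySem.List.pyRange_one_eq_nil (by omega : min y b ≤ x), List.map_nil]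
  · rw [PySem.List.pyRange_one_append a x b hax hxb.le, List.map_append,
        List.drop_left' (by simp [PySem.List.length_pyRange_one])]
    rcases le_or_gt y b with hyb | hby
    · rw [min_eq_left hyb]
      rcases le_or_gt y x with hyx | hxy
      · rw [show (y - a).toNat - (x - a).toNat = 0 by omega, List.take_zero,
            PySem.List.pyRange_one_eq_nil hyx, List.map_nil]
      · rw [PySem.List.pyRange_one_append x y b hxy.le hyb, List.map_append,
            show (y - a).toNat - (x - a).toNat = (y - x).toNat by omega,
            List.take_left' (by simp [PySem.List.length_pyRange_one])]
    · rw [min_eq_right hby.le]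
      exact List.take_of_length_le (by simp [PySem.List.length_pyRange_one]; omega)

-- the left ≤ right case: A agrees with B
theorem solution_eq_of_le (n L R : Int) (hn : 1 ≤ n) (hL0 : 0 ≤ L) (hLR : L ≤ R) :
    solution n L R = solution_alt n L R := by
  unfold solution
  obtain ⟨d', M, hres, hd'L, hMn, hdisj⟩ :=
    loopInv n.toNat n L R 0 1 hn hL0 hLR (by omega) (by omega) hL0 (by omega) (by omega)
  rw [show ((1:Int) - 1) * n = 0 by ring, PySem.List.pyRange_one_eq_nil (le_refl 0)] at hres
  simp only [List.map_nil, sub_zero] at hres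
  rw [hres]
  show PySem.List.slice (List.map (gVal n) (PySem.List.pyRange d' M 1)) (some (L - d'))
      (some (R - d' + 1)) = solution_alt n L R
  have := slice_map_pyRange (gVal n) d' M L (R + 1) hd'L (by omega)
  rw [show R - d' + 1 = (R + 1) - d' by ring, this,
      show min (R + 1) M = min (R + 1) (n * n) by omega]
  rfl

-- on a reversed window the loop skips whole rows while left > n, then builds exactly one
-- row and breaks: final offset m*n with L ≤ m*n + n (or m = n with everything skipped)
theorem loopRL (k : Nat) : ∀ (n L R i : Int), 1 ≤ n → R < L → 1 ≤ i → i ≤ n + 1 →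
    (n + 1) - i = (k : Int) → (i = 1 ∨ (i - 1) * n < L) →
    ∃ m e, 0 ≤ m ∧ (m = 0 ∨ m * n < L) ∧
      solutionLoop n (PySem.List.pyRange i (n + 1) 1) [] (L - (i - 1) * n) (R - (i - 1) * n)
        = ((PySem.List.pyRange (m * n) e 1).map (gVal n), L - m * n, R - m * n)
      ∧ ((m < n ∧ e = m * n + n ∧ L ≤ m * n + n) ∨ (m = n ∧ e = m * n ∧ n * n < L)) := by
  induction k with
  | zero =>
    intro n L R i hn hRL hi1 hin hk hentry
    have hi : i = n + 1 := by omega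
    subst hi
    have hnL : n * n < L := by
      rcases hentry with h1 | h2
      · omega
      · have : (n + 1 - 1) * n = n * n := by ring
        omega
    rw [PySem.List.pyRange_one_eq_nil (le_refl _)]
    refine ⟨n, n * n, by omega, Or.inr hnL, ?_, Or.inr ⟨rfl, rfl, hnL⟩⟩
    rw [show (n + 1 - 1) * n = n * n by ring,
        PySem.List.pyRange_one_eq_nil (le_refl (n * n)), List.map_nil]
    rfl
  | succ k ih =>
    intro n L R i hn hRL hi1 hin hk hentry
    have hilt : i < n + 1 := by omega
    have e2 : i * n - (i - 1) * n = n := by ring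
    rw [PySem.List.pyRange_one_cons hilt]
    simp only [solutionLoop]
    by_cases hskip : L - (i - 1) * n > n
    · rw [if_pos hskip]
      rw [show L - (i - 1) * n - n = L - (i + 1 - 1) * n by ring,
          show R - (i - 1) * n - n = R - (i + 1 - 1) * n by ring]
      refine ih n L R (i + 1) hn hRL (by omega) (by omega) (by omega) (Or.inr ?_)
      have : (i + 1 - 1) * n = (i - 1) * n + n := by ring
      omega
    · rw [if_neg hskip]
      rw [List.nil_append, row_eq n i hn hi1 (by omega)]
      rw [if_pos (by simp [PySem.List.length_pyRange_one]; omega)]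
      refine ⟨i - 1, i * n, by omega, ?_, ?_, Or.inl ⟨by omega, by ring, by omega⟩⟩
      · rcases hentry with h1 | h2
        · exact Or.inl (by omega)
        · exact Or.inr h2
      · rfl

-- the loop's final offset is the closed form D_solution uses
theorem s_char (n L m : Int) (hn : 1 ≤ n) (hL0 : 0 ≤ L) (hm0 : 0 ≤ m)
    (hd : m = 0 ∨ m * n < L)
    (hcase : (m < n ∧ L ≤ m * n + n) ∨ (m = n ∧ n * n < L)) :
    m = min n (max 0 (PySem.Int.floordiv (L - 1) n)) := by
  have hq := (PySem.Int.floordiv_eq_iff_of_pos (by omega : (0:Int) < n)).mp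
    (rfl : PySem.Int.floordiv (L - 1) n = PySem.Int.floordiv (L - 1) n)
  set q := PySem.Int.floordiv (L - 1) n with hqdef
  obtain ⟨hq1, hq2⟩ := hq
  rcases hcase with ⟨hmn, hLm⟩ | ⟨hmn, hLn⟩
  · rcases hd with hm | hmL
    · -- m = 0, L ≤ n: q ≤ 0
      subst hm
      have hqle : q ≤ 0 := by nlinarith
      have hqge : -1 ≤ q := by nlinarith
      rcases le_or_gt q (-1) with h | h
      · have : q = -1 := by omega
        rw [this]; omega
      · have : q = 0 := by omega
        rw [this]; omega
    · -- m*n < L ≤ m*n + n: q = m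
      have h1 : q ≤ m := by nlinarith
      have h2 : m ≤ q := by nlinarith
      have : q = m := by omega
      rw [this]
      have : 0 ≤ m := hm0
      omega
  · -- m = n, n*n < L: q ≥ n
    subst hmn
    have : m ≤ q := by nlinarith
    omega

theorem clampIdx_le_clampIdx (N : Nat) (a b : Int) (ha : 0 ≤ a) (hba : b ≤ a)
    (h : (N : Int) + b ≤ a ∨ 0 ≤ b) : PySem.List.clampIdx N b ≤ PySem.List.clampIdx N a := by
  unfold PySem.List.clampIdx
  split_ifs <;> omega

theorem clampIdx_lt_clampIdx (N : Nat) (a b : Int) (ha : 0 ≤ a) (hb : b < 0)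
    (h : a < (N : Int) + b) : PySem.List.clampIdx N a < PySem.List.clampIdx N b := by
  unfold PySem.List.clampIdx
  split_ifs <;> omega

theorem slice_eq_nil_of_clamp {α : Type} (xs : List α) (a b : Int)
    (h : PySem.List.clampIdx xs.length b ≤ PySem.List.clampIdx xs.length a) :
    PySem.List.slice xs (some a) (some b) = [] := by
  apply List.eq_nil_of_length_eq_zero
  rw [PySem.List.length_slice]
  omega

theorem row_len (n m : Int) :
    ((PySem.List.pyRange (m * n) (m * n + n) 1).map (gVal n)).length = n.toNat := by
  rw [List.length_map, PySem.List.length_pyRange_one]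
  congr 1
  ring

-- the reversed-window case outside D_: A returns the empty slice, as B does
theorem solution_eq_of_rev (n L R : Int) (hn : 1 ≤ n) (hL0 : 0 ≤ L) (hRL : R < L)
    (hD : ¬ D_solution n L R) : solution n L R = solution_alt n L R := by
  have halt : solution_alt n L R = [] := by
    unfold solution_alt
    rw [PySem.List.pyRange_one_eq_nil (by omega : min (R + 1) (n * n) ≤ L), List.map_nil]
  rw [halt]
  obtain ⟨m, e, hm0, hmL, hres, hcase⟩ :=
    loopRL n.toNat n L R 1 hn hRL (by omega) (by omega) (by omega) (Or.inl rfl)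
  rw [show ((1:Int) - 1) * n = 0 by ring, sub_zero, sub_zero] at hres
  rw [solution_eq_slice n L R _ _ _ hres]
  rcases hcase with ⟨hmn, he, hLm⟩ | ⟨hmn, he, hLn⟩
  · -- one row [m*n, m*n+n) was built; ¬D forces the window to clamp to nothing
    subst he
    have hs : m = min n (max 0 (PySem.Int.floordiv (L - 1) n)) :=
      s_char n L m hn hL0 hm0 hmL (Or.inl ⟨hmn, hLm⟩)
    have hLn2 : L ≤ n * n := by
      nlinarith [mul_le_mul_of_nonneg_right (show m + 1 ≤ n by omega) (show (0:Int) ≤ n by omega)]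
    have hnd : L - R > n ∨ m * n - 1 ≤ R := by
      by_cases h1 : L - R > n
      · exact Or.inl h1
      · by_cases h2 : m * n - 1 ≤ R
        · exact Or.inr h2
        · exact absurd ⟨hn, hL0, hLn2, hRL, by omega, by rw [← hs]; omega⟩ hD
    apply slice_eq_nil_of_clamp
    rw [row_len]
    have hLm0 : 0 ≤ L - m * n := by
      rcases hmL with h | h
      · subst h; simp [hL0]
      · omega
    exact clampIdx_le_clampIdx n.toNat (L - m * n) (R - m * n + 1) hLm0 (by omega)
      (by rcases hnd with h | h
          · exact Or.inl (by omega)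
          · exact Or.inr (by omega))
  · -- everything was skipped: the accumulator is empty
    subst he
    rw [PySem.List.pyRange_one_eq_nil (le_refl (m * n)), List.map_nil]
    apply slice_eq_nil_of_clamp
    simp only [List.length_nil, PySem.List.clampIdx]
    split_ifs <;> omega

-- ===== VERDICT (by name: the statement is the Claim_ definition above) =====
-- n = 0: A's loop runs over no rows; B's clamp min(right+1, 0) empties the range
theorem solution_eq_zero (L R : Int) (hL0 : 0 ≤ L) : solution 0 L R = solution_alt 0 L R := by
  unfold solution solution_alt
  rw [PySem.List.pyRange_one_eq_nil (by omega : (0:Int) + 1 ≤ 1)]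
  rw [PySem.List.pyRange_one_eq_nil (by omega : min (R + 1) (0 * 0) ≤ L), List.map_nil]
  show PySem.List.slice ([] : List Int) (some L) (some (R + 1)) = []
  exact slice_eq_nil_of_clamp _ _ _ (by simp [PySem.List.clampIdx]; split_ifs <;> omega)

theorem solution_spec : Claim_unchanged_solution := by
  intro n L R _ hpre hD
  obtain ⟨hn0, hL0⟩ := hpre
  rcases eq_or_lt_of_le hn0 with hz | hn
  · rw [← hz]
    exact solution_eq_zero L R hL0
  · rcases le_or_gt L R with hLR | hRL
    · exact solution_eq_of_le n L R hn hL0 hLR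
    · exact solution_eq_of_rev n L R hn hL0 hRL hD

theorem solution_changed : Claim_changed_solution := by
  unfold Claim_changed_solution; decide

theorem solution_tight : Claim_exact_solution := by
  intro n L R _ hpre hD
  obtain ⟨hn, hL0, hLn2, hRL, hLRn, hRs⟩ := hD
  have halt : solution_alt n L R = [] := by
    unfold solution_alt
    rw [PySem.List.pyRange_one_eq_nil (by omega : min (R + 1) (n * n) ≤ L), List.map_nil]
  rw [halt]
  obtain ⟨m, e, hm0, hmL, hres, hcase⟩ :=
    loopRL n.toNat n L R 1 hn hRL (by omega) (by omega) (by omega) (Or.inl rfl)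
  rw [show ((1:Int) - 1) * n = 0 by ring, sub_zero, sub_zero] at hres
  rw [solution_eq_slice n L R _ _ _ hres]
  rcases hcase with ⟨hmn, he, hLm⟩ | ⟨hmn, he, hLn⟩
  · subst he
    have hs : m = min n (max 0 (PySem.Int.floordiv (L - 1) n)) :=
      s_char n L m hn hL0 hm0 hmL (Or.inl ⟨hmn, hLm⟩)
    rw [← hs] at hRs
    intro hcon
    have hlen0 : (PySem.List.slice ((PySem.List.pyRange (m * n) (m * n + n) 1).map (gVal n))
        (some (L - m * n)) (some (R - m * n + 1))).length = 0 := by rw [hcon]; rfl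
    rw [PySem.List.length_slice, row_len] at hlen0
    have hLm0 : 0 ≤ L - m * n := by
      rcases hmL with h | h
      · subst h; simp [hL0]
      · omega
    have hlt := clampIdx_lt_clampIdx n.toNat (L - m * n) (R - m * n + 1) hLm0
      (by omega) (by omega)
    omega
  · -- m = n contradicts left ≤ n*n together with m*n < L
    rcases hmL with h | h
    · omega
    · subst hmn; omega
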